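-- pv_equiv track=rewrite | github.com/arturoprg/swedishBot | NuevasPalabras.py | palabras_seleccionadas
-- ===== SOURCE A (Python) =====
-- def palabras_seleccionadas(dictio,preguntas):
--     cont = 0
--     dictio2 = {}
--     voc = False
--     for i in dictio:
--         if voc and not dictio.get(i) == '':
--             dictio2[i] = dictio.get(i)
--         if dictio.get(i) == '':
--             voc = False
--             try:
--                 if i == preguntas:
--                     voc = True
--             except:
--                 pass
--     return (dictio2)
-- ===== SOURCE B (Python) =====
-- def palabras_seleccionadas(dictio, preguntas):
--     items = list(dictio.items())
--     for idx, (k, v) in enumerate(items):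
--         if k == preguntas and v == '':
--             seccion = {}
--             for k2, v2 in items[idx + 1:]:
--                 if v2 == '':
--                     break
--                 seccion[k2] = v2
--             return seccion
--     return {}
-- ===== Notes on version B (the rewrite author's own statement) =====
-- stated objective: simpler
-- what changed: Replaces A's whole-pass boolean-flag loop (which keeps scanning after the section ends) with a find-then-take decomposition: locate the header pair (preguntas, '') and return the following entries up to the next ''-valued entry, stopping early.
import Mathlib
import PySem

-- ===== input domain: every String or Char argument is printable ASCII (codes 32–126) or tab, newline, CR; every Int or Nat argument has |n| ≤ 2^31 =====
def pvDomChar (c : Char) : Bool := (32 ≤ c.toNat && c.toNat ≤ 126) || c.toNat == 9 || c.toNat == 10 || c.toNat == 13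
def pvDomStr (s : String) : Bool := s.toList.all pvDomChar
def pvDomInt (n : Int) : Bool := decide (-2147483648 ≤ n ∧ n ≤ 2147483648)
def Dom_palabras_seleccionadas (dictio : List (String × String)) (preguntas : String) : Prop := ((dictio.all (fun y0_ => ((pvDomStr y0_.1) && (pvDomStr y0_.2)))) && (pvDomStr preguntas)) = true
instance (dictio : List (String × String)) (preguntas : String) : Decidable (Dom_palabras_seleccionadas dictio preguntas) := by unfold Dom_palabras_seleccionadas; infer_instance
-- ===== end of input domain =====

-- B replaces A's whole-pass boolean-flag loop with a find-then-take decomposition (locate the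
-- header (preguntas, ''), return the entries up to the next ''-valued one); return values agree
-- on every input; objective: simpler.

-- ===== PORT A =====
-- A's loop body: state is (dictio2, voc); 'voc = False; if i == preguntas: voc = True' under
-- 'dictio.get(i) == ""' is exactly voc := (i == preguntas).  The unused 'cont = 0' and the
-- never-raising try/except are dropped.
def pvStepA (preguntas : String) (st : PySem.Dict String String × Bool) (iv : String × String) :
    PySem.Dict String String × Bool :=
  ( if st.2 && !(iv.2 == "") then st.1.insert iv.1 iv.2 else st.1,
    if iv.2 == "" then iv.1 == preguntas else st.2 )

-- dictio is a Python dict, read per the convention via Dict.ofList; iterating the dict visits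
-- its items in order and dictio.get(i) is the item's value.
def palabras_seleccionadas (dictio : List (String × String)) (preguntas : String) : List (String × String) :=
  ((PySem.Dict.ofList dictio).items.foldl (pvStepA preguntas) (PySem.Dict.empty, false)).1.items

-- ===== PORT B =====
-- items[idx+1:] with the break: take entries until the first ''-valued one.  The keys seen here
-- come from dict items, hence are distinct, so 'seccion[k2] = v2' always appends a fresh key:
-- building the result list by cons is that dict's items list.
def pvTakeSec (items : List (String × String)) : List (String × String) :=
  match items with
  | [] => []
  | (k, v) :: rest => if v == "" then [] else (k, v) :: pvTakeSec rest

-- the outer for/enumerate loop with its early return: scan for the header pair (preguntas, '')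
def pvFindSec (items : List (String × String)) (preguntas : String) : List (String × String) :=
  match items with
  | [] => []
  | (k, v) :: rest => if k == preguntas && v == "" then pvTakeSec rest else pvFindSec rest preguntas

def palabras_seleccionadas_alt (dictio : List (String × String)) (preguntas : String) : List (String × String) :=
  pvFindSec (PySem.Dict.ofList dictio).items preguntas

-- ===== PRECONDITION & SPEC =====
def Spec_palabras_seleccionadas (dictio : List (String × String)) (preguntas : String) (out : List (String × String)) : Prop := out = palabras_seleccionadas_alt dictio preguntas
instance (dictio : List (String × String)) (preguntas : String) (out : List (String × String)) : Decidable (Spec_palabras_seleccionadas dictio preguntas out) := by unfold Spec_palabras_seleccionadas; infer_instance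

-- ===== CLAIM (what is proved, stated in full; the proofs are below) =====
def Claim_equal_palabras_seleccionadas : Prop := ∀ (dictio : List (String × String)) (preguntas : String), Dom_palabras_seleccionadas dictio preguntas → Spec_palabras_seleccionadas dictio preguntas (palabras_seleccionadas dictio preguntas)

-- ===== LEMMAS AND PROOFS =====

-- if no key equals preguntas, the loop started with voc = False never changes state
theorem pvFoldA_false_frozen (preguntas : String) (items : List (String × String))
    (d : PySem.Dict String String) (hnp : preguntas ∉ items.map (·.1)) :
    items.foldl (pvStepA preguntas) (d, false) = (d, false) := by
  induction items with
  | nil => rfl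
  | cons p rest ih =>
    obtain ⟨k, v⟩ := p
    simp only [List.map_cons, List.mem_cons, not_or] at hnp
    have hk : (k == preguntas) = false := by
      simp only [beq_eq_false_iff_ne]; exact fun h => hnp.1 h.symm
    have hstep : pvStepA preguntas (d, false) (k, v) = (d, false) := by
      simp [pvStepA, hk]
    rw [List.foldl_cons, hstep]
    exact ih hnp.2

-- with voc = True, distinct keys none equal to preguntas, all fresh in d: the loop appends pvTakeSec
theorem pvFoldA_true (preguntas : String) (items : List (String × String)) :
    ∀ d : PySem.Dict String String, (items.map (·.1)).Nodup →
    (∀ p ∈ items, d.contains p.1 = false) → preguntas ∉ items.map (·.1) →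
    (items.foldl (pvStepA preguntas) (d, true)).1.items = d.items ++ pvTakeSec items := by
  induction items with
  | nil => intro d _ _ _; simp [pvTakeSec]
  | cons p rest ih =>
    intro d hnd hfr hnp
    obtain ⟨k, v⟩ := p
    simp only [List.map_cons, List.nodup_cons] at hnd
    simp only [List.map_cons, List.mem_cons, not_or] at hnp
    by_cases hv : v = ""
    · subst hv
      have hk : (k == preguntas) = false := by
        simp only [beq_eq_false_iff_ne]; exact fun h => hnp.1 h.symm
      have hstep : pvStepA preguntas (d, true) (k, "") = (d, false) := by
        simp [pvStepA, hk]
      rw [List.foldl_cons, hstep, pvFoldA_false_frozen preguntas rest d hnp.2]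
      simp [pvTakeSec]
    · have hstep : pvStepA preguntas (d, true) (k, v) = (d.insert k v, true) := by
        simp [pvStepA, hv]
      have hdk : d.contains k = false := hfr (k, v) (by simp)
      rw [List.foldl_cons, hstep, ih (d.insert k v) hnd.2
        (fun q hq => by
          rw [PySem.Dict.contains_insert]
          have hqk : (q.1 == k) = false := by
            simp only [beq_eq_false_iff_ne]
            intro h; exact hnd.1 (h ▸ (List.mem_map.mpr ⟨q, hq, rfl⟩))
          simp [hqk, hfr q (List.mem_cons_of_mem _ hq)])
        hnp.2]
      simp [PySem.Dict.items_insert, hdk, pvTakeSec, hv]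

-- with voc = False, distinct fresh keys: the loop appends pvFindSec
theorem pvFoldA_false (preguntas : String) (items : List (String × String)) :
    ∀ d : PySem.Dict String String, (items.map (·.1)).Nodup →
    (∀ p ∈ items, d.contains p.1 = false) →
    (items.foldl (pvStepA preguntas) (d, false)).1.items = d.items ++ pvFindSec items preguntas := by
  induction items with
  | nil => intro d _ _; simp [pvFindSec]
  | cons p rest ih =>
    intro d hnd hfr
    obtain ⟨k, v⟩ := p
    simp only [List.map_cons, List.nodup_cons] at hnd
    by_cases hh : k = preguntas ∧ v = ""
    · obtain ⟨hk, hv⟩ := hh; subst hv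
      have hknp : preguntas ∉ rest.map (·.1) := by rw [← hk]; exact hnd.1
      have hstep : pvStepA preguntas (d, false) (k, "") = (d, true) := by
        simp [pvStepA, hk]
      rw [List.foldl_cons, hstep, pvFoldA_true preguntas rest d hnd.2
        (fun q hq => hfr q (List.mem_cons_of_mem _ hq)) hknp]
      simp [pvFindSec, hk]
    · have hbr : (k == preguntas && v == "") = false := by
        rcases not_and_or.mp hh with h | h <;> simp [h]
      have hstep : pvStepA preguntas (d, false) (k, v) = (d, false) := by
        by_cases hv : v = ""
        · have hk : (k == preguntas) = false := by
            rcases not_and_or.mp hh with h | h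
            · simp [h]
            · exact absurd hv h
          simp [pvStepA, hv, hk]
        · simp [pvStepA, hv]
      rw [List.foldl_cons, hstep, ih d hnd.2 (fun q hq => hfr q (List.mem_cons_of_mem _ hq))]
      simp [pvFindSec, hbr]

-- ===== VERDICT (by name: the statement is the Claim_ definition above) =====
theorem palabras_seleccionadas_spec : Claim_equal_palabras_seleccionadas := by
  intro dictio preguntas _
  show _ = _
  unfold palabras_seleccionadas palabras_seleccionadas_alt
  have hnd : ((PySem.Dict.ofList dictio).items.map (·.1)).Nodup := by
    have h := PySem.Dict.nodup_keys_ofList (κ := String) (ν := String) dictio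
    simpa [PySem.Dict.keys] using h
  rw [pvFoldA_false preguntas _ _ hnd (fun q _ => PySem.Dict.contains_empty q.1)]
  rfl
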